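-- pv_equiv track=rewrite | github.com/REvDl/Algorithmic_practice | leetcode/2026/medium/robotSim.py | robotSim_vrite_again
-- ===== SOURCE A (Python) =====
-- from typing import List
--
-- def robotSim_vrite_again(commands: List[int], obstacles: List[List[int]]) -> int:
-- 	direction, set_obs = [[0, 1], [1, 0], [0, -1], [-1, 0]], {tuple(o) for o in obstacles}
-- 	curr_dr, max_dist = 0, 0
-- 	x, y = 0, 0
-- 	for command in commands:
-- 		if command == -1:
-- 			curr_dr = (curr_dr + 1) % 4
-- 		elif command == -2:
-- 			curr_dr = (curr_dr + 3) % 4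
-- 		else:
-- 			dx, dy = direction[curr_dr]
-- 			for _ in range(command):
-- 				nx, ny = x + dx, y + dy
-- 				if (nx, ny) in set_obs:
-- 					break
-- 				x, y = nx, ny
-- 				if x ** 2 + y ** 2 > max_dist:
-- 					max_dist = x ** 2 + y ** 2
-- 	return max_dist
-- ===== SOURCE B (Python) =====
-- from typing import List
--
-- def robotSim_vrite_again(commands: List[int], obstacles: List[List[int]]) -> int:
--     dirs = ((0, 1), (1, 0), (0, -1), (-1, 0))
--     d = 0
--     x = y = best = 0
--     for c in commands:
--         if c == -1:
--             d = (d + 1) % 4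
--         elif c == -2:
--             d = (d + 3) % 4
--         else:
--             dx, dy = dirs[d]
--             # nearest obstacle straight ahead caps the run at k - 1 steps
--             t = c
--             for o in obstacles:
--                 if len(o) != 2:
--                     continue
--                 ox, oy = o
--                 if dx == 0 and ox == x and dy * (oy - y) > 0:
--                     k = dy * (oy - y)
--                 elif dy == 0 and oy == y and dx * (ox - x) > 0:
--                     k = dx * (ox - x)
--                 else:
--                     continue
--                 if k - 1 < t:
--                     t = k - 1
--             if t > 0:
--                 x += dx * t
--                 y += dy * t
--                 # distance^2 is convex along a straight run: max attained at an endpoint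
--                 if x * x + y * y > best:
--                     best = x * x + y * y
--     return best
-- ===== Notes on version B (the rewrite author's own statement) =====
-- stated objective: faster
-- what changed: B replaces A's cell-by-cell simulation of each forward command (one set lookup and max update per unit step) by a single scan of the obstacle list that finds the nearest obstacle on the ray ahead, jumps straight to the last free cell, and updates the maximum only at the run's endpoint (distance squared is convex along a straight run).
import Mathlib
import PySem

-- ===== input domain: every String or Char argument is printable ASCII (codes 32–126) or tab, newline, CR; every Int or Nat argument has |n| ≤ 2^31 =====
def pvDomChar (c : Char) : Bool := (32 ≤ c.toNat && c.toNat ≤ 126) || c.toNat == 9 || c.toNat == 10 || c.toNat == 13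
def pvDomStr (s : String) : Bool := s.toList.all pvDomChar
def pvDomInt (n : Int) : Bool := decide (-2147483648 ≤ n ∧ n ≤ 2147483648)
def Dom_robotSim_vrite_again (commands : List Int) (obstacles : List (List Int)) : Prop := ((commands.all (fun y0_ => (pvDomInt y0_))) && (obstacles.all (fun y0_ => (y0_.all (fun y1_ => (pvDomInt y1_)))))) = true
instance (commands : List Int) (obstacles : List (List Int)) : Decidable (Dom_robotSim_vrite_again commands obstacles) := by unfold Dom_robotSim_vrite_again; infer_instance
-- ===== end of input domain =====

-- B replaces A's cell-by-cell walk by a per-command jump: it scans the obstacle list once per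
-- forward command for the nearest obstacle on the ray ahead and moves straight to the last free
-- cell, updating the maximum only at the run's endpoint (distance² is convex along a run).

-- ===== PORT A =====
-- the direction table [[0,1],[1,0],[0,-1],[-1,0]] (pairs; A's inner lists have length 2)
def pvDirs : List (Int × Int) := [(0, 1), (1, 0), (0, -1), (-1, 0)]

-- A's inner `for _ in range(command)` loop; membership `(nx,ny) in set_obs` is exactly
-- `[nx,ny] ∈ obstacles`, since `{tuple(o) for o in obstacles}` holds the same tuples.
def pvStepLoop (obs : List (List Int)) (dx dy : Int) : Nat → Int → Int → Int → Int × Int × Int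
  | 0, x, y, m => (x, y, m)
  | n + 1, x, y, m =>
    let nx := x + dx
    let ny := y + dy
    if [nx, ny] ∈ obs then (x, y, m)
    else pvStepLoop obs dx dy n nx ny (if nx ^ 2 + ny ^ 2 > m then nx ^ 2 + ny ^ 2 else m)

-- A's body for one command, on the state (curr_dr, max_dist, x, y)
def pvAStep (obstacles : List (List Int)) (st : Int × Int × Int × Int) (command : Int) :
    Int × Int × Int × Int :=
  let (curr_dr, max_dist, x, y) := st
  if command = -1 then (PySem.Int.mod (curr_dr + 1) 4, max_dist, x, y)
  else if command = -2 then (PySem.Int.mod (curr_dr + 3) 4, max_dist, x, y)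
  else
    let (dx, dy) := ((PySem.List.pyGet? pvDirs curr_dr).getD (0, 0))  -- curr_dr ∈ [0,4) always
    let (nx, ny, nm) := pvStepLoop obstacles dx dy command.toNat x y max_dist
    (curr_dr, nm, nx, ny)

def robotSim_vrite_again (commands : List Int) (obstacles : List (List Int)) : Int :=
  (commands.foldl (pvAStep obstacles) (0, 0, 0, 0)).2.1

-- ===== PORT B =====
-- Source B's per-obstacle update of the cap t (rows of length ≠ 2 are skipped)
def pvRayStep (dx dy x y t : Int) : List Int → Int
  | [ox, oy] =>
    if dx = 0 ∧ ox = x ∧ dy * (oy - y) > 0 then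
      if dy * (oy - y) - 1 < t then dy * (oy - y) - 1 else t
    else if dy = 0 ∧ oy = y ∧ dx * (ox - x) > 0 then
      if dx * (ox - x) - 1 < t then dx * (ox - x) - 1 else t
    else t
  | _ => t

-- Source B's inner `for o in obstacles` scan
def pvRayMin (dx dy x y : Int) : List (List Int) → Int → Int
  | [], t => t
  | o :: os, t => pvRayMin dx dy x y os (pvRayStep dx dy x y t o)

def pvAltGo (obstacles : List (List Int)) : List Int → Int → Int → Int → Int → Int
  | [], _, best, _, _ => best
  | c :: cs, d, best, x, y =>
    if c = -1 then pvAltGo obstacles cs (PySem.Int.mod (d + 1) 4) best x y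
    else if c = -2 then pvAltGo obstacles cs (PySem.Int.mod (d + 3) 4) best x y
    else
      let (dx, dy) := ((PySem.List.pyGet? pvDirs d).getD (0, 0))
      let t := pvRayMin dx dy x y obstacles c
      if t > 0 then
        let x' := x + dx * t
        let y' := y + dy * t
        pvAltGo obstacles cs d (if x' * x' + y' * y' > best then x' * x' + y' * y' else best) x' y'
      else pvAltGo obstacles cs d best x y

def robotSim_vrite_again_alt (commands : List Int) (obstacles : List (List Int)) : Int :=
  pvAltGo obstacles commands 0 0 0 0

-- ===== PRECONDITION & SPEC =====
def Spec_robotSim_vrite_again (commands : List Int) (obstacles : List (List Int)) (out : Int) : Prop := out = robotSim_vrite_again_alt commands obstacles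
instance (commands : List Int) (obstacles : List (List Int)) (out : Int) : Decidable (Spec_robotSim_vrite_again commands obstacles out) := by unfold Spec_robotSim_vrite_again; infer_instance

-- ===== CLAIM (what is proved, stated in full; the proofs are below) =====
def Claim_equal_robotSim_vrite_again : Prop := ∀ (commands : List Int) (obstacles : List (List Int)), Dom_robotSim_vrite_again commands obstacles → Spec_robotSim_vrite_again commands obstacles (robotSim_vrite_again commands obstacles)

-- ===== LEMMAS AND PROOFS =====

lemma pvRayStep_le (dx dy x y t : Int) (o : List Int) : pvRayStep dx dy x y t o ≤ t := by
  match o with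
  | [] => simp [pvRayStep]
  | [_] => simp [pvRayStep]
  | [ox, oy] => simp only [pvRayStep]; split_ifs <;> linarith
  | _ :: _ :: _ :: _ => simp [pvRayStep]

lemma pvRayStep_cases (dx dy x y t : Int) (hdir : dx * dx + dy * dy = 1) (o : List Int) :
    pvRayStep dx dy x y t o = t ∨
      (0 ≤ pvRayStep dx dy x y t o ∧
        o = [x + dx * (pvRayStep dx dy x y t o + 1), y + dy * (pvRayStep dx dy x y t o + 1)]) := by
  match o with
  | [] => left; simp [pvRayStep]
  | [_] => left; simp [pvRayStep]
  | [ox, oy] =>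
    simp only [pvRayStep]
    split_ifs with h1 h2 h3 h4
    · obtain ⟨hdx, hox, hk⟩ := h1
      right
      have hdy : dy * dy = 1 := by rw [hdx] at hdir; linarith
      have key : dy * (dy * (oy - y)) = oy - y := by linear_combination (oy - y) * hdy
      refine ⟨by linarith, ?_⟩
      simp only [List.cons.injEq, and_true]
      refine ⟨?_, ?_⟩
      · rw [hdx, hox]; ring
      · linear_combination -key
    · left; rfl
    · obtain ⟨hdy, hoy, hk⟩ := h3
      right
      have hdx : dx * dx = 1 := by rw [hdy] at hdir; linarith
      have key : dx * (dx * (ox - x)) = ox - x := by linear_combination (ox - x) * hdx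
      refine ⟨by linarith, ?_⟩
      simp only [List.cons.injEq, and_true]
      refine ⟨?_, ?_⟩
      · linear_combination -key
      · rw [hdy, hoy]; ring
    · left; rfl
    · left; rfl
  | _ :: _ :: _ :: _ => left; simp [pvRayStep]

lemma pvRayStep_hit (dx dy x y t : Int) (hdir : dx * dx + dy * dy = 1) (j : Int) (hj : 1 ≤ j) :
    pvRayStep dx dy x y t [x + dx * j, y + dy * j] ≤ j - 1 := by
  have hsq : dx * dx = 0 ∧ dy * dy = 1 ∨ dx * dx = 1 ∧ dy * dy = 0 := by
    have h1 : 0 ≤ dx * dx := mul_self_nonneg dx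
    have h2 : 0 ≤ dy * dy := mul_self_nonneg dy
    generalize hA : dx * dx = a at *
    generalize hB : dy * dy = b at *
    omega
  rcases hsq with ⟨hA, hB⟩ | ⟨hA, hB⟩
  · have hdx : dx = 0 := mul_self_eq_zero.mp hA
    have key : dy * (y + dy * j - y) = j := by linear_combination j * hB
    simp only [pvRayStep]
    rw [if_pos ⟨hdx, by rw [hdx]; ring, by linarith [key]⟩, key]
    split_ifs <;> linarith
  · have hdy : dy = 0 := mul_self_eq_zero.mp hB
    have key : dx * (x + dx * j - x) = j := by linear_combination j * hA
    simp only [pvRayStep]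
    rw [if_neg (fun h => by rw [h.1] at hA; norm_num at hA),
        if_pos ⟨hdy, by rw [hdy]; ring, by linarith [key]⟩, key]
    split_ifs <;> linarith

lemma pvRayMin_le (dx dy x y : Int) (obstacles : List (List Int)) :
    ∀ t, pvRayMin dx dy x y obstacles t ≤ t := by
  induction obstacles with
  | nil => intro t; simp [pvRayMin]
  | cons o os ih =>
    intro t
    calc pvRayMin dx dy x y (o :: os) t = pvRayMin dx dy x y os (pvRayStep dx dy x y t o) := rfl
      _ ≤ pvRayStep dx dy x y t o := ih _
      _ ≤ t := pvRayStep_le dx dy x y t o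

lemma pvRayMin_cases (dx dy x y : Int) (hdir : dx * dx + dy * dy = 1)
    (obstacles : List (List Int)) :
    ∀ t, pvRayMin dx dy x y obstacles t = t ∨
      (0 ≤ pvRayMin dx dy x y obstacles t ∧
        [x + dx * (pvRayMin dx dy x y obstacles t + 1),
         y + dy * (pvRayMin dx dy x y obstacles t + 1)] ∈ obstacles) := by
  induction obstacles with
  | nil => intro t; left; rfl
  | cons o os ih =>
    intro t
    have hrw : pvRayMin dx dy x y (o :: os) t = pvRayMin dx dy x y os (pvRayStep dx dy x y t o) := rfl
    rw [hrw]
    rcases pvRayStep_cases dx dy x y t hdir o with h' | ⟨h0', hform⟩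
    · rw [h']
      rcases ih t with h | ⟨h0, hmem⟩
      · exact Or.inl h
      · exact Or.inr ⟨h0, List.mem_cons_of_mem _ hmem⟩
    · rcases ih (pvRayStep dx dy x y t o) with h | ⟨h0, hmem⟩
      · rw [h]
        exact Or.inr ⟨h0', by rw [← hform]; exact List.mem_cons_self⟩
      · exact Or.inr ⟨h0, List.mem_cons_of_mem _ hmem⟩

lemma pvRayMin_le_of_hit (dx dy x y : Int) (hdir : dx * dx + dy * dy = 1)
    (obstacles : List (List Int)) (j : Int) (hj : 1 ≤ j)
    (hhit : [x + dx * j, y + dy * j] ∈ obstacles) :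
    ∀ t, pvRayMin dx dy x y obstacles t ≤ j - 1 := by
  induction obstacles with
  | nil => exact absurd hhit (by simp)
  | cons o os ih =>
    intro t
    rcases List.mem_cons.mp hhit with h | h
    · calc pvRayMin dx dy x y (o :: os) t
          = pvRayMin dx dy x y os (pvRayStep dx dy x y t o) := rfl
        _ ≤ pvRayStep dx dy x y t o := pvRayMin_le dx dy x y os _
        _ ≤ j - 1 := by rw [← h]; exact pvRayStep_hit dx dy x y t hdir j hj
    · exact ih h _

lemma pvIteMax (a m : Int) : (if a > m then a else m) = max m a := by
  split_ifs with h <;> omega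

lemma pvStepLoop_eq (obs : List (List Int)) (dx dy : Int) (hdir : dx * dx + dy * dy = 1) :
    ∀ (n t : Nat) (x y m : Int), t ≤ n → x ^ 2 + y ^ 2 ≤ m →
      (∀ j : Nat, 1 ≤ j → j ≤ t → [x + dx * (j : Int), y + dy * (j : Int)] ∉ obs) →
      (t < n → [x + dx * ((t : Int) + 1), y + dy * ((t : Int) + 1)] ∈ obs) →
      pvStepLoop obs dx dy n x y m =
        (x + dx * t, y + dy * t, max m ((x + dx * t) ^ 2 + (y + dy * t) ^ 2)) := by
  intro n
  induction n with
  | zero =>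
    intro t x y m hle hm _ _
    interval_cases t
    simp [pvStepLoop, max_eq_left hm]
  | succ n ih =>
    intro t x y m hle hm hfree hstop
    by_cases hmem : [x + dx, y + dy] ∈ obs
    · have ht : t = 0 := by
        by_contra h
        exact hfree 1 le_rfl (by omega) (by simpa using hmem)
      subst ht
      simp [pvStepLoop, hmem, max_eq_left hm]
    · match t with
      | 0 =>
        exact absurd (by simpa using hstop (Nat.succ_pos n)) hmem
      | t' + 1 =>
        have hstep : pvStepLoop obs dx dy (n + 1) x y m =
            pvStepLoop obs dx dy n (x + dx) (y + dy)
              (if (x + dx) ^ 2 + (y + dy) ^ 2 > m then (x + dx) ^ 2 + (y + dy) ^ 2 else m) := by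
          simp [pvStepLoop, hmem]
        rw [hstep, pvIteMax]
        have ihres := ih t' (x + dx) (y + dy) (max m ((x + dx) ^ 2 + (y + dy) ^ 2))
          (by omega) (le_max_right _ _)
          (by
            intro j hj1 hjt hmemj
            refine hfree (j + 1) (by omega) (by omega) ?_
            have h1 : x + dx * ((j : Int) + 1) = x + dx + dx * (j : Int) := by ring
            have h2 : y + dy * ((j : Int) + 1) = y + dy + dy * (j : Int) := by ring
            push_cast
            rw [h1, h2]; exact hmemj)
          (by
            intro hlt
            have := hstop (by omega)
            have h1 : x + dx + dx * ((t' : Int) + 1) = x + dx * (((t' : Int) + 1) + 1) := by ring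
            have h2 : y + dy + dy * ((t' : Int) + 1) = y + dy * (((t' : Int) + 1) + 1) := by ring
            rw [h1, h2]
            push_cast at this ⊢
            exact this)
        rw [ihres]
        have hpos1 : x + dx + dx * (t' : Int) = x + dx * ((t' : Int) + 1) := by ring
        have hpos2 : y + dy + dy * (t' : Int) = y + dy * ((t' : Int) + 1) := by ring
        have hT1 : (0:Int) ≤ (t' : Int) := Int.natCast_nonneg t'
        have hkey : (x + dx) ^ 2 + (y + dy) ^ 2 ≤ m ∨
            (x + dx) ^ 2 + (y + dy) ^ 2 ≤
              (x + dx * ((t' : Int) + 1)) ^ 2 + (y + dy * ((t' : Int) + 1)) ^ 2 := by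
          by_cases hs : 0 ≤ x * dx + y * dy
          · right
            have hexp : (x + dx * ((t' : Int) + 1)) ^ 2 + (y + dy * ((t' : Int) + 1)) ^ 2
                - ((x + dx) ^ 2 + (y + dy) ^ 2)
                = 2 * ((x * dx + y * dy) * ((t' : Int) + 1 - 1))
                  + (dx * dx + dy * dy) * ((((t' : Int) + 1) - 1) * (((t' : Int) + 1) + 1)) := by
              ring
            rw [hdir] at hexp
            have h1 : 0 ≤ (x * dx + y * dy) * ((t' : Int) + 1 - 1) :=
              mul_nonneg hs (by linarith)
            have h2 : 0 ≤ (((t' : Int) + 1) - 1) * (((t' : Int) + 1) + 1) :=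
              mul_nonneg (by linarith) (by linarith)
            linarith
          · left
            have hexp : (x + dx) ^ 2 + (y + dy) ^ 2 - (x ^ 2 + y ^ 2)
                = 2 * (x * dx + y * dy) + (dx * dx + dy * dy) := by ring
            rw [hdir] at hexp
            have : x * dx + y * dy ≤ -1 := by omega
            linarith
        simp only [Prod.mk.injEq]
        refine ⟨by push_cast; rw [hpos1], by push_cast; rw [hpos2], ?_⟩
        push_cast
        rw [hpos1, hpos2]
        rcases hkey with h | h
        · rw [max_eq_left h]
        · rw [max_assoc, max_eq_right h]

lemma pvCommand_eq (obs : List (List Int)) (dx dy : Int) (hdir : dx * dx + dy * dy = 1)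
    (c x y m : Int) (hm : x ^ 2 + y ^ 2 ≤ m) :
    pvStepLoop obs dx dy c.toNat x y m =
      (if pvRayMin dx dy x y obs c > 0 then
        (x + dx * pvRayMin dx dy x y obs c, y + dy * pvRayMin dx dy x y obs c,
          max m ((x + dx * pvRayMin dx dy x y obs c) ^ 2 + (y + dy * pvRayMin dx dy x y obs c) ^ 2))
      else (x, y, m)) := by
  set t := pvRayMin dx dy x y obs c with ht
  have htle : t ≤ c := pvRayMin_le dx dy x y obs c
  by_cases hc : c ≤ 0
  · rw [if_neg (by omega)]
    have : c.toNat = 0 := by omega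
    rw [this]; rfl
  · have hc' : 0 < c := by omega
    have hcases := pvRayMin_cases dx dy x y hdir obs c
    rw [← ht] at hcases
    have ht0 : 0 ≤ t := by rcases hcases with h | ⟨h, _⟩ <;> omega
    have hcast : ((t.toNat : Int)) = t := Int.toNat_of_nonneg ht0
    have hres := pvStepLoop_eq obs dx dy hdir c.toNat t.toNat x y m
      (by omega) hm
      (by
        intro j hj1 hjt hmemj
        have hle := pvRayMin_le_of_hit dx dy x y hdir obs (j : Int)
          (by exact_mod_cast hj1) hmemj c
        rw [← ht] at hle
        omega)
      (by
        intro hlt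
        rcases hcases with h | ⟨_, hmem⟩
        · omega
        · rw [hcast]; exact hmem)
    rw [hres, hcast]
    by_cases htpos : t > 0
    · rw [if_pos htpos]
    · have ht00 : t = 0 := by omega
      rw [if_neg htpos, ht00]
      simp [max_eq_left hm]

lemma pvDir_unit (d : Int) (h0 : 0 ≤ d) (h4 : d < 4) :
    ((PySem.List.pyGet? pvDirs d).getD (0, 0)).1 * ((PySem.List.pyGet? pvDirs d).getD (0, 0)).1
      + ((PySem.List.pyGet? pvDirs d).getD (0, 0)).2 * ((PySem.List.pyGet? pvDirs d).getD (0, 0)).2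
      = 1 := by
  interval_cases d <;> decide

lemma pvMain_go (obstacles : List (List Int)) :
    ∀ (cs : List Int) (d m x y : Int), 0 ≤ d → d < 4 → x ^ 2 + y ^ 2 ≤ m →
      (cs.foldl (pvAStep obstacles) (d, m, x, y)).2.1 = pvAltGo obstacles cs d m x y := by
  intro cs
  induction cs with
  | nil => intro d m x y _ _ _; rfl
  | cons c cs ih =>
    intro d m x y h0 h4 hm
    by_cases hc1 : c = -1
    · have hA : pvAStep obstacles (d, m, x, y) c = (PySem.Int.mod (d + 1) 4, m, x, y) := by
        simp [pvAStep, hc1]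
      have hB : pvAltGo obstacles (c :: cs) d m x y =
          pvAltGo obstacles cs (PySem.Int.mod (d + 1) 4) m x y := by
        simp [pvAltGo, hc1]
      rw [List.foldl_cons, hA, hB]
      exact ih _ _ _ _ (PySem.Int.mod_nonneg _ (by norm_num)) (PySem.Int.mod_lt _ (by norm_num)) hm
    · by_cases hc2 : c = -2
      · have hA : pvAStep obstacles (d, m, x, y) c = (PySem.Int.mod (d + 3) 4, m, x, y) := by
          simp [pvAStep, hc2]
        have hB : pvAltGo obstacles (c :: cs) d m x y =
            pvAltGo obstacles cs (PySem.Int.mod (d + 3) 4) m x y := by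
          simp [pvAltGo, hc2]
        rw [List.foldl_cons, hA, hB]
        exact ih _ _ _ _ (PySem.Int.mod_nonneg _ (by norm_num)) (PySem.Int.mod_lt _ (by norm_num)) hm
      · set p := (PySem.List.pyGet? pvDirs d).getD (0, 0) with hp
        have hdir : p.1 * p.1 + p.2 * p.2 = 1 := pvDir_unit d h0 h4
        set t := pvRayMin p.1 p.2 x y obstacles c with htdef
        have hcmd := pvCommand_eq obstacles p.1 p.2 hdir c x y m hm
        rw [← htdef] at hcmd
        have hA : pvAStep obstacles (d, m, x, y) c =
            (d, (pvStepLoop obstacles p.1 p.2 c.toNat x y m).2.2,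
              (pvStepLoop obstacles p.1 p.2 c.toNat x y m).1,
              (pvStepLoop obstacles p.1 p.2 c.toNat x y m).2.1) := by
          simp [pvAStep, hc1, hc2, ← hp]
        rw [hcmd] at hA
        by_cases htpos : t > 0
        · rw [if_pos htpos] at hA
          dsimp only at hA
          have hB : pvAltGo obstacles (c :: cs) d m x y =
              pvAltGo obstacles cs d
                (if (x + p.1 * t) * (x + p.1 * t) + (y + p.2 * t) * (y + p.2 * t) > m then
                  (x + p.1 * t) * (x + p.1 * t) + (y + p.2 * t) * (y + p.2 * t) else m)
                (x + p.1 * t) (y + p.2 * t) := by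
            simp only [pvAltGo, if_neg hc1, if_neg hc2, ← hp, ← htdef, if_pos htpos]
          rw [List.foldl_cons, hA, hB, pvIteMax]
          have hsq : (x + p.1 * t) * (x + p.1 * t) + (y + p.2 * t) * (y + p.2 * t)
              = (x + p.1 * t) ^ 2 + (y + p.2 * t) ^ 2 := by ring
          rw [hsq]
          exact ih _ _ _ _ h0 h4 (le_max_right _ _)
        · rw [if_neg htpos] at hA
          dsimp only at hA
          have hB : pvAltGo obstacles (c :: cs) d m x y = pvAltGo obstacles cs d m x y := by
            simp only [pvAltGo, if_neg hc1, if_neg hc2, ← hp, ← htdef, if_neg htpos]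
          rw [List.foldl_cons, hA, hB]
          exact ih _ _ _ _ h0 h4 hm

-- ===== VERDICT (by name: the statement is the Claim_ definition above) =====
theorem robotSim_vrite_again_spec : Claim_equal_robotSim_vrite_again := by
  intro commands obstacles _
  show robotSim_vrite_again commands obstacles = robotSim_vrite_again_alt commands obstacles
  unfold robotSim_vrite_again robotSim_vrite_again_alt
  exact pvMain_go obstacles commands 0 0 0 0 (by norm_num) (by norm_num) (by norm_num)
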